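-- pv_equiv track=rewrite | github.com/Voktir/goit-pnc-hw-02 | 3_table_vig.py | vigenere_encrypt_with_spaces
-- ===== SOURCE A (Python) =====
-- def prepare_text_with_positions(text):
--     """Підготовка тексту із збереженням спеціальних символів"""
--     special_chars = {}
--     clean_text = ""
--     for i, char in enumerate(text):
--         if char.isalpha():
--             clean_text += char.upper()
--         else:
--             special_chars[i] = char
--     return clean_text, special_chars
--
-- def restore_special_chars(text, special_chars, original_length):
--     """Відновлення спеціальних символів у тексті"""
--     result = list(text)
--     offset = 0
--
--     for pos, char in sorted(special_chars.items()):
--         result.insert(pos, char)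
--         offset += 1
--
--     return ''.join(result[:original_length])
--
-- def vigenere_encrypt_with_spaces(text, key):
--     """Шифрування методом Віженера зі збереженням форматування"""
--     original_length = len(text)
--     clean_text, special_chars = prepare_text_with_positions(text)
--     key = ''.join(c.upper() for c in key if c.isalpha())
--     key = (key * (len(clean_text) // len(key) + 1))[:len(clean_text)]
--
--     encrypted = ''
--     for i in range(len(clean_text)):
--         shift = (ord(clean_text[i]) + ord(key[i]) - 2 * ord('A')) % 26
--         encrypted += chr(shift + ord('A'))
--
--     return restore_special_chars(encrypted, special_chars, original_length)
-- ===== SOURCE B (Python) =====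
-- def vigenere_encrypt_with_spaces(text, key):
--     """Vigenere encryption keeping non-alphabetic characters in place.
--
--     Single O(n) pass over the text: non-alphabetic characters are copied
--     through, alphabetic ones are encrypted with the next key letter.
--     """
--     ks = [ord(c.upper()) - 65 for c in key if c.isalpha()]
--     out = []
--     j = 0
--     for ch in text:
--         if ch.isalpha():
--             out.append(chr((ord(ch.upper()) - 65 + ks[j % len(ks)]) % 26 + 65))
--             j += 1
--         else:
--             out.append(ch)
--     return ''.join(out)
-- ===== Notes on version B (the rewrite author's own statement) =====
-- stated objective: faster
-- what changed: Instead of extracting the letters, encrypting them into a separate string by repeated concatenation and then re-inserting every special character with list.insert (each insert shifting the tail), B does one linear pass over the text, copying non-letters through and encrypting letters with a key-letter counter.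
import Mathlib
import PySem

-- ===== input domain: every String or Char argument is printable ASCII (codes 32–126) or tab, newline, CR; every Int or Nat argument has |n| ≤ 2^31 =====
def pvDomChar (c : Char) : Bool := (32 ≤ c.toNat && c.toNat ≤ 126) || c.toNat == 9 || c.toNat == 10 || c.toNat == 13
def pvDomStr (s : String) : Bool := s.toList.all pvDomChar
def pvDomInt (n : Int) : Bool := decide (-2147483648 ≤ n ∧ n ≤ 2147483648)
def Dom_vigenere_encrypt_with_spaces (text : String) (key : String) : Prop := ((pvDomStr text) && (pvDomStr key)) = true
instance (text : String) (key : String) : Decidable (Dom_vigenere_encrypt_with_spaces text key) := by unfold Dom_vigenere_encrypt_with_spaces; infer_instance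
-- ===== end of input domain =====

-- B replaces A's extract/encrypt/re-insert pipeline (quadratic list.insert loop) with one
-- linear pass that encrypts letters and copies other characters through; same return value.

-- ===== PORT A =====
def prepare_text_with_positions (text : String) : List Char × PySem.Dict Int Char :=
  (PySem.List.enumerate text.toList 0).foldl
    (fun acc p =>
      if PySem.Chars.isalpha p.2 then (acc.1 ++ [PySem.Chars.upperChar p.2], acc.2)
      else (acc.1, acc.2.insert p.1 p.2))
    ([], PySem.Dict.empty)

def restore_special_chars (text : List Char) (special_chars : PySem.Dict Int Char)
    (original_length : Int) : List Char :=
  -- sorted(special_chars.items()): the dict's keys are distinct, so Python's tuple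
  -- sort never compares the second components — sorting by the key is exact here
  let sortedItems := PySem.List.sorted special_chars.items (fun p => p.1) false
  let result := sortedItems.foldl (fun r p => PySem.List.insert r p.1 p.2) text
  PySem.List.slice result none (some original_length)

def vigenere_encrypt_with_spaces (text : String) (key : String) : String :=
  let original_length := PySem.Str.len text
  let pr := prepare_text_with_positions text
  let clean_text := pr.1
  let special_chars := pr.2
  let key1 := (key.toList.filter (fun c => PySem.Chars.isalpha c)).map PySem.Chars.upperChar
  -- key * (len(clean_text) // len(key) + 1) then [:len(clean_text)]; the repeat count
  -- is the Nat division len(clean_text)/len(key1) + 1, exact since both are nonnegative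
  -- (Pre_ excludes the empty key1, where Python raises ZeroDivisionError)
  let key2 := PySem.List.slice
      (List.flatten (List.replicate (clean_text.length / key1.length + 1) key1))
      none (some (clean_text.length : Int))
  let encrypted := (PySem.List.pyRange 0 (clean_text.length : Int) 1).foldl
      (fun enc i =>
        let shift := PySem.Int.mod
          (((PySem.List.pyGetD clean_text i 'A').toNat : Int)
            + ((PySem.List.pyGetD key2 i 'A').toNat : Int) - 2 * 65) 26
        enc ++ [Char.ofNat (shift.toNat + 65)])
      []
  String.mk (restore_special_chars encrypted special_chars original_length)

-- ===== PORT B =====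
def pvAltGo (ks : List Nat) : List Char → Nat → List Char
  | [], _ => []
  | c :: rest, j =>
    if PySem.Chars.isalpha c then
      Char.ofNat (((PySem.Chars.upperChar c).toNat - 65 + ks.getD (j % ks.length) 0) % 26 + 65)
        :: pvAltGo ks rest (j + 1)
    else c :: pvAltGo ks rest j

def vigenere_encrypt_with_spaces_alt (text : String) (key : String) : String :=
  let ks := (key.toList.filter (fun c => PySem.Chars.isalpha c)).map
      (fun c => (PySem.Chars.upperChar c).toNat - 65)
  String.mk (pvAltGo ks text.toList 0)

-- ===== PRECONDITION & SPEC =====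
-- Pre_ excludes keys without any alphabetic character: there A always raises ZeroDivisionError.
def Pre_vigenere_encrypt_with_spaces (text : String) (key : String) : Prop :=
  key.toList.any (fun c => PySem.Chars.isalpha c) = true
instance (text : String) (key : String) : Decidable (Pre_vigenere_encrypt_with_spaces text key) := by unfold Pre_vigenere_encrypt_with_spaces; infer_instance

def pvWitness_vigenere_encrypt_with_spaces : String × String := ("Hello, World!", "key")

def Spec_vigenere_encrypt_with_spaces (text : String) (key : String) (out : String) : Prop := out = vigenere_encrypt_with_spaces_alt text key
instance (text : String) (key : String) (out : String) : Decidable (Spec_vigenere_encrypt_with_spaces text key out) := by unfold Spec_vigenere_encrypt_with_spaces; infer_instance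

-- ===== CLAIM (what is proved, stated in full; the proofs are below) =====
def Claim_equal_vigenere_encrypt_with_spaces : Prop := ∀ (text : String) (key : String), Dom_vigenere_encrypt_with_spaces text key → Pre_vigenere_encrypt_with_spaces text key → Spec_vigenere_encrypt_with_spaces text key (vigenere_encrypt_with_spaces text key)

-- ===== LEMMAS AND PROOFS =====

-- A's clean text: the alphabetic characters, uppercased.
def pvClean (t : List Char) : List Char :=
  (t.filter (fun c => PySem.Chars.isalpha c)).map PySem.Chars.upperChar

-- A's special_chars dict as a list: (position, char) for each non-alphabetic char.
def pvSpecials : List Char → Int → List (Int × Char)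
  | [], _ => []
  | c :: r, s =>
    if PySem.Chars.isalpha c then pvSpecials r (s + 1) else (s, c) :: pvSpecials r (s + 1)

-- A's cipher letter for clean character c at clean index j.
def pvEncChar (key1 : List Char) (c : Char) (j : Nat) : Char :=
  Char.ofNat ((PySem.Int.mod ((c.toNat : Int)
    + ((key1.getD (j % key1.length) 'A').toNat : Int) - 2 * 65) 26).toNat + 65)

-- A's encrypted string, generated recursively.
def pvEncStream (key1 : List Char) : List Char → Nat → List Char
  | [], _ => []
  | c :: r, j => pvEncChar key1 c j :: pvEncStream key1 r (j + 1)

lemma pvAltGo_length (ks : List Nat) : ∀ (t : List Char) (j : Nat), (pvAltGo ks t j).length = t.length := by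
  intro t
  induction t with
  | nil => intro j; simp [pvAltGo]
  | cons c r ih => intro j; by_cases hc : PySem.Chars.isalpha c = true <;> simp [pvAltGo, hc, ih]

lemma pvPrep_go (t : List Char) : ∀ (s : Int) (cl : List Char) (d : PySem.Dict Int Char),
    (∀ k ∈ d.keys, k < s) →
    (PySem.List.enumerate t s).foldl
      (fun acc p =>
        if PySem.Chars.isalpha p.2 then (acc.1 ++ [PySem.Chars.upperChar p.2], acc.2)
        else (acc.1, acc.2.insert p.1 p.2))
      (cl, d)
    = (cl ++ pvClean t, PySem.Dict.mk (d.items ++ pvSpecials t s)) := by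
  induction t with
  | nil =>
    intro s cl d hd
    simp [PySem.List.enumerate, pvClean, pvSpecials]
  | cons c r ih =>
    intro s cl d hd
    rw [PySem.List.enumerate_cons]
    simp only [List.foldl_cons]
    by_cases hc : PySem.Chars.isalpha c = true
    · rw [if_pos hc]
      rw [ih (s + 1) (cl ++ [PySem.Chars.upperChar c]) d
        (by intro k hk; have := hd k hk; omega)]
      simp only [pvClean, pvSpecials, List.filter_cons, hc, if_pos, List.map_cons,
        List.append_assoc, List.singleton_append]
    · have hcont : d.contains s = false := by
        rcases Bool.eq_false_or_eq_true (d.contains s) with h | h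
        · have := hd s ((PySem.Dict.contains_iff_mem_keys d s).mp h)
          omega
        · exact h
      rw [if_neg hc]
      rw [ih (s + 1) cl (d.insert s c)
        (by
          intro k hk
          rw [PySem.Dict.keys_insert_of_not_contains d c hcont] at hk
          rcases List.mem_append.mp hk with h | h
          · have := hd k h; omega
          · simp at h; omega)]
      rw [PySem.Dict.items_insert_of_not_contains d c hcont]
      simp only [pvClean, pvSpecials, List.filter_cons, hc, List.append_assoc,
        List.singleton_append]
      simp

lemma pvPrep_spec (text : String) :
    prepare_text_with_positions text
      = (pvClean text.toList, PySem.Dict.mk (pvSpecials text.toList 0)) := by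
  unfold prepare_text_with_positions
  rw [pvPrep_go text.toList 0 [] PySem.Dict.empty (by simp [PySem.Dict.empty, PySem.Dict.keys])]
  simp [PySem.Dict.empty]

lemma pvSpecials_lb : ∀ (t : List Char) (s : Int), ∀ p ∈ pvSpecials t s, s ≤ p.1 := by
  intro t
  induction t with
  | nil => intro s p hp; simp [pvSpecials] at hp
  | cons c r ih =>
    intro s p hp
    by_cases hc : PySem.Chars.isalpha c = true
    · simp only [pvSpecials, hc, if_true] at hp
      have := ih (s + 1) p hp; omega
    · simp only [pvSpecials] at hp
      rw [if_neg hc] at hp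
      rcases List.mem_cons.mp hp with h | hp'
      · rw [h]
      · have := ih (s + 1) p hp'; omega

lemma pvSpecials_pairwise : ∀ (t : List Char) (s : Int),
    (pvSpecials t s).Pairwise (fun a b => a.1 < b.1) := by
  intro t
  induction t with
  | nil => intro s; simp [pvSpecials]
  | cons c r ih =>
    intro s
    by_cases hc : PySem.Chars.isalpha c = true <;> simp only [pvSpecials, hc, if_true, if_false]
    · exact ih (s + 1)
    · refine List.Pairwise.cons (fun p hp => ?_) (ih (s + 1))
      have := pvSpecials_lb r (s + 1) p hp
      omega

lemma pvFlatRep_getD (key1 : List Char) (hm : 0 < key1.length) :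
    ∀ (r i : Nat), i < r * key1.length →
    (List.flatten (List.replicate r key1)).getD i 'A' = key1.getD (i % key1.length) 'A' := by
  intro r
  induction r with
  | zero => intro i hi; omega
  | succ r ih =>
    intro i hi
    rw [List.replicate_succ, List.flatten_cons]
    by_cases h : i < key1.length
    · rw [List.getD_append _ _ _ _ h, Nat.mod_eq_of_lt h]
    · push_neg at h
      rw [List.getD_append_right _ _ _ _ h]
      rw [Nat.succ_mul] at hi
      rw [ih (i - key1.length) (by omega)]
      rw [Nat.mod_eq_sub_mod h]

lemma pvEncStream_eq (key1 : List Char) : ∀ (cl : List Char) (j : Nat),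
    pvEncStream key1 cl j
      = (List.range cl.length).map (fun k => pvEncChar key1 (cl.getD k 'A') (j + k)) := by
  intro cl
  induction cl with
  | nil => intro j; simp [pvEncStream]
  | cons c r ih =>
    intro j
    simp only [pvEncStream, List.length_cons]
    rw [List.range_succ_eq_map]
    simp only [List.map_cons, List.map_map, List.getD_cons_zero, Nat.add_zero]
    refine congrArg₂ _ rfl ?_
    rw [ih (j + 1)]
    refine List.map_congr_left ?_
    intro k hk
    simp only [Function.comp_apply, List.getD_cons_succ]
    rw [show j + 1 + k = j + (k + 1) from by omega]

lemma pvEncLoop_eq (cl key1 : List Char) (hm : 0 < key1.length) :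
    (PySem.List.pyRange 0 (cl.length : Int) 1).foldl
      (fun enc i =>
        enc ++ [Char.ofNat ((PySem.Int.mod
          (((PySem.List.pyGetD cl i 'A').toNat : Int)
            + ((PySem.List.pyGetD (PySem.List.slice
                  (List.flatten (List.replicate (cl.length / key1.length + 1) key1))
                  none (some (cl.length : Int))) i 'A').toNat : Int) - 2 * 65) 26).toNat + 65)])
      []
    = pvEncStream key1 cl 0 := by
  rw [PySem.List.foldl_append_singleton_eq_map
    (f := fun i => Char.ofNat ((PySem.Int.mod
      (((PySem.List.pyGetD cl i 'A').toNat : Int)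
        + ((PySem.List.pyGetD (PySem.List.slice
              (List.flatten (List.replicate (cl.length / key1.length + 1) key1))
              none (some (cl.length : Int))) i 'A').toNat : Int) - 2 * 65) 26).toNat + 65))]
  rw [PySem.List.pyRange_zero_nat, List.map_map, List.nil_append]
  rw [pvEncStream_eq key1 cl 0]
  refine List.map_congr_left ?_
  intro k hk
  rw [List.mem_range] at hk
  simp only [Function.comp_apply, PySem.List.pyGetD_natCast]
  rw [PySem.List.slice_to _ (by positivity)]
  have htake : (List.take (cl.length : Int).toNat
      (List.flatten (List.replicate (cl.length / key1.length + 1) key1))).getD k 'A'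
      = (List.flatten (List.replicate (cl.length / key1.length + 1) key1)).getD k 'A' := by
    rw [List.getD_eq_getElem?_getD, List.getD_eq_getElem?_getD]
    rw [List.getElem?_take_of_lt (by simpa using hk)]
  rw [htake]
  rw [pvFlatRep_getD key1 hm (cl.length / key1.length + 1) k
    (by
      rw [Nat.add_mul, Nat.one_mul]
      exact hk.trans (Nat.lt_div_mul_add hm))]
  simp [pvEncChar]

lemma pvOfNat_toNat {n : Nat} (h1 : 65 ≤ n) (h2 : n ≤ 90) : (Char.ofNat n).toNat = n := by
  rw [Char.toNat_ofNat, if_pos]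
  exact Or.inl (by omega)

lemma pvUpper_bound (c : Char) (hc : PySem.Chars.isalpha c = true) :
    65 ≤ (PySem.Chars.upperChar c).toNat ∧ (PySem.Chars.upperChar c).toNat ≤ 90 := by
  simp [PySem.Chars.isalpha] at hc
  rcases hc with h | h
  · have hb := h
    simp [PySem.Chars.isupper] at hb
    obtain ⟨hb1', hb2'⟩ := hb
    have hb1 : (65:Nat) ≤ c.toNat := hb1'
    have hb2 : c.toNat ≤ (90:Nat) := hb2'
    have hl : PySem.Chars.islower c = false := by
      simp [PySem.Chars.islower]
      intro hx
      exact absurd (show (97:Nat) ≤ c.toNat from hx) (by omega)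
    simp [PySem.Chars.upperChar, hl]
    exact ⟨hb1, hb2⟩
  · have hb := h
    simp [PySem.Chars.islower] at hb
    obtain ⟨hb1', hb2'⟩ := hb
    have hb1 : (97:Nat) ≤ c.toNat := hb1'
    have hb2 : c.toNat ≤ (122:Nat) := hb2'
    simp [PySem.Chars.upperChar, h]
    rw [pvOfNat_toNat (by omega) (by omega)]
    omega

lemma pvEncChar_eq_b (ks : List Nat) (key1 : List Char)
    (hks : ks = key1.map (fun c => c.toNat - 65)) (hm : 0 < key1.length)
    (hbound : ∀ c ∈ key1, 65 ≤ c.toNat ∧ c.toNat ≤ 90)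
    (c : Char) (hc : PySem.Chars.isalpha c = true) (j : Nat) :
    pvEncChar key1 (PySem.Chars.upperChar c) j
      = Char.ofNat (((PySem.Chars.upperChar c).toNat - 65 + ks.getD (j % ks.length) 0) % 26 + 65) := by
  have hlen : ks.length = key1.length := by rw [hks, List.length_map]
  have hj : j % key1.length < key1.length := Nat.mod_lt _ hm
  have hgd : ks.getD (j % ks.length) 0 = (key1.getD (j % key1.length) 'A').toNat - 65 := by
    rw [hks]
    simp only [List.length_map]
    rw [List.getD_eq_getElem?_getD, List.getD_eq_getElem?_getD, List.getElem?_map]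
    rw [List.getElem?_eq_getElem hj]
    simp
  rw [hgd]
  have hkmem : key1.getD (j % key1.length) 'A' ∈ key1 := by
    rw [List.getD_eq_getElem?_getD, List.getElem?_eq_getElem hj]
    exact List.getElem_mem hj
  obtain ⟨ha1, ha2⟩ := hbound _ hkmem
  obtain ⟨hb1, hb2⟩ := pvUpper_bound c hc
  unfold pvEncChar
  congr 1
  set a := (key1.getD (j % key1.length) 'A').toNat
  set b := (PySem.Chars.upperChar c).toNat
  rw [PySem.Int.mod_eq_emod_of_pos (by norm_num)]
  rw [show ((b : Int) + (a : Int) - 2 * 65) = (((b - 65 + (a - 65) : Nat)) : Int) from by omega]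
  omega

lemma pvMerge (ks : List Nat) (key1 : List Char)
    (hks : ks = key1.map (fun c => c.toNat - 65)) (hm : 0 < key1.length)
    (hbound : ∀ c ∈ key1, 65 ≤ c.toNat ∧ c.toNat ≤ 90) :
    ∀ (t : List Char) (j : Nat) (pre : List Char),
    (pvSpecials t (pre.length : Int)).foldl
        (fun r p => PySem.List.insert r p.1 p.2) (pre ++ pvEncStream key1 (pvClean t) j)
      = pre ++ pvAltGo ks t j := by
  intro t
  induction t with
  | nil => intro j pre; simp [pvSpecials, pvClean, pvEncStream, pvAltGo]
  | cons c r ih =>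
    intro j pre
    by_cases hc : PySem.Chars.isalpha c = true
    · have hcl : pvClean (c :: r) = PySem.Chars.upperChar c :: pvClean r := by
        simp [pvClean, hc]
      rw [hcl]
      simp only [pvSpecials, pvAltGo]
      rw [if_pos hc, if_pos hc]
      simp only [pvEncStream]
      rw [show pre ++ pvEncChar key1 (PySem.Chars.upperChar c) j
            :: pvEncStream key1 (pvClean r) (j + 1)
          = (pre ++ [pvEncChar key1 (PySem.Chars.upperChar c) j])
            ++ pvEncStream key1 (pvClean r) (j + 1) from by simp]
      rw [show ((pre.length : Int) + 1)
          = (((pre ++ [pvEncChar key1 (PySem.Chars.upperChar c) j]).length : Int)) from by simp]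
      rw [ih (j + 1) (pre ++ [pvEncChar key1 (PySem.Chars.upperChar c) j])]
      rw [pvEncChar_eq_b ks key1 hks hm hbound c hc j]
      simp
    · have hcl : pvClean (c :: r) = pvClean r := by simp [pvClean, hc]
      rw [hcl]
      simp only [pvSpecials, pvAltGo]
      rw [if_neg hc, if_neg hc]
      simp only [List.foldl_cons]
      rw [PySem.List.insert_natCast (pre ++ pvEncStream key1 (pvClean r) j) pre.length c
        (by simp)]
      rw [List.take_left, List.drop_left]
      rw [show pre ++ c :: pvEncStream key1 (pvClean r) j
          = (pre ++ [c]) ++ pvEncStream key1 (pvClean r) j from by simp]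
      rw [show ((pre.length : Int) + 1) = (((pre ++ [c]).length : Int)) from by simp]
      rw [ih j (pre ++ [c])]
      simp

-- ===== VERDICT (by name: the statement is the Claim_ definition above) =====
theorem vigenere_encrypt_with_spaces_spec : Claim_equal_vigenere_encrypt_with_spaces := by
  intro text key hdom hpre
  unfold Spec_vigenere_encrypt_with_spaces
  obtain ⟨c0, hc0mem, hc0⟩ := List.any_eq_true.mp hpre
  have hfil : c0 ∈ key.toList.filter (fun c => PySem.Chars.isalpha c) :=
    List.mem_filter.mpr ⟨hc0mem, hc0⟩
  have hm : 0 < ((key.toList.filter (fun c => PySem.Chars.isalpha c)).map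
      PySem.Chars.upperChar).length :=
    List.length_pos_of_mem (List.mem_map_of_mem hfil)
  have hbound : ∀ c ∈ (key.toList.filter (fun c => PySem.Chars.isalpha c)).map
      PySem.Chars.upperChar, 65 ≤ c.toNat ∧ c.toNat ≤ 90 := by
    intro x hx
    rcases List.mem_map.mp hx with ⟨c1, hc1mem, rfl⟩
    exact pvUpper_bound c1 (List.mem_filter.mp hc1mem).2
  have hks : (key.toList.filter (fun c => PySem.Chars.isalpha c)).map
        (fun c => (PySem.Chars.upperChar c).toNat - 65)
      = ((key.toList.filter (fun c => PySem.Chars.isalpha c)).map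
          PySem.Chars.upperChar).map (fun c => c.toNat - 65) := by
    rw [List.map_map]
    rfl
  simp only [vigenere_encrypt_with_spaces, vigenere_encrypt_with_spaces_alt]
  rw [pvPrep_spec text]
  simp only [restore_special_chars]
  rw [pvEncLoop_eq (pvClean text.toList)
    ((key.toList.filter (fun c => PySem.Chars.isalpha c)).map PySem.Chars.upperChar) hm]
  rw [PySem.List.sorted_eq_self_of_pairwise _ _
    ((pvSpecials_pairwise text.toList 0).imp (fun h => le_of_lt h))]
  have hmerge := pvMerge _ _ hks hm hbound text.toList 0 []
  simp only [List.length_nil, Nat.cast_zero, List.nil_append] at hmerge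
  rw [hmerge]
  have hlen : PySem.Str.len text = ((pvAltGo ((key.toList.filter
      (fun c => PySem.Chars.isalpha c)).map (fun c => (PySem.Chars.upperChar c).toNat - 65))
      text.toList 0).length : Int) := by
    rw [pvAltGo_length]
    simp [PySem.Str.len_eq]
  rw [hlen, PySem.List.slice_to _ (by positivity)]
  simp
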